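-- pv_equiv track=rewrite | github.com/id-milan/05_Skripte | 2021-11 PX2DT/plaxisparser/mat_parameters.py | parse_elastic
-- ===== SOURCE A (Python) =====
-- def parse_elastic(tokens):
--     """Parse Elastic material parameters."""
--     params = [
--         "Identification",
--         "MaterialType",
--         "Colour",
--         "Gamma",
--         "Isotropic",
--         "E1",
--         "D3d",
--         "G12",
--     ]
--
--     # Initialize an empty dictionary to store parameters and their values
--     parsed_params = {}
--
--     # Iterate over each parameter
--     for param in params:
--         # Check if the parameter is in the tokens list (strip quotes for comparison)
--         stripped_tokens = [token.replace('"', "") for token in tokens]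
--         if param in stripped_tokens:
--             # Find the index of the parameter
--             param_index = stripped_tokens.index(param)
--             # Get the value following the parameter, remove quotes, and store in the dictionary
--             param_value = tokens[param_index + 1].replace('"', "")
--             parsed_params[param] = param_value
--
--     return parsed_params
-- ===== SOURCE B (Python) =====
-- def parse_elastic(tokens):
--     """Parse Elastic material parameters (single pass over the token stream)."""
--     order = [
--         "Identification",
--         "MaterialType",
--         "Colour",
--         "Gamma",
--         "Isotropic",
--         "E1",
--         "D3d",
--         "G12",
--     ]
--     wanted = set(order)
--     found = {}
--     # one forward pass: record the value after the FIRST occurrence of each wanted name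
--     for i, tok in enumerate(tokens):
--         name = tok.replace('"', "")
--         if name in wanted and name not in found:
--             found[name] = tokens[i + 1].replace('"', "")
--     # emit in the canonical parameter order (same insertion order as repeated scans)
--     return {p: found[p] for p in order if p in found}
-- ===== Notes on version B (the rewrite author's own statement) =====
-- stated objective: faster
-- what changed: Instead of re-building the stripped token list and scanning it once per parameter name, B makes one pass over the tokens, recording the value after the first occurrence of each wanted name in a dict, and then emits the results in the canonical parameter order.
import Mathlib
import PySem

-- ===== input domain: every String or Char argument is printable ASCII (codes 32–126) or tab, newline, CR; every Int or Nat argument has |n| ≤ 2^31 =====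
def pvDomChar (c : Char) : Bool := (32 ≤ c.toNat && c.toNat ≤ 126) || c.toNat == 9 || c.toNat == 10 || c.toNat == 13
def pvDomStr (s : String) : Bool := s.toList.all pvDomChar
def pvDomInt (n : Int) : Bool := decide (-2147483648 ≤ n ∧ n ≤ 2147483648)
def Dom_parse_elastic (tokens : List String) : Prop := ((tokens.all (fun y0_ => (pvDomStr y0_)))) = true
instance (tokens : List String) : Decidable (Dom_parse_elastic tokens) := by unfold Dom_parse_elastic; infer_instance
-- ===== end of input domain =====

-- B replaces A's per-parameter rescan of the stripped token list by a single forward pass over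
-- the tokens (recording the value after each wanted name's first occurrence) plus an emit in
-- canonical parameter order: asymptotically fewer scans; return values proved equal on Pre_.


-- ===== PORT A =====
-- token.replace('"', "")
def pvStripQ (s : String) : String := PySem.Str.replace s "\"" ""

def pvParams : List String :=
  ["Identification", "MaterialType", "Colour", "Gamma", "Isotropic", "E1", "D3d", "G12"]

-- value after position i, quotes removed; `.getD ""` fires exactly where Python raises
-- IndexError (tokens[i+1] out of range) — those inputs are excluded by Pre_.
def pvVal (tokens : List String) (i : Int) : String :=
  pvStripQ ((PySem.List.pyGet? tokens (i + 1)).getD "")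

-- stripped_tokens = [token.replace('"', "") for token in tokens] = tokens.map pvStripQ,
-- rebuilt on every iteration in A; `param in stripped_tokens` + `.index(param)` = index?.
def parse_elastic (tokens : List String) : List (String × String) :=
  (pvParams.foldl
    (fun (d : PySem.Dict String String) param =>
      match PySem.List.index? (tokens.map pvStripQ) param with
      | some i => d.insert param (pvVal tokens (i : Int))
      | none => d)
    PySem.Dict.empty).items

-- ===== PORT B =====
def parse_elastic_alt (tokens : List String) : List (String × String) :=
  let found := (PySem.List.enumerate tokens 0).foldl
    (fun (d : PySem.Dict String String) it =>
      let name := pvStripQ it.2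
      if pvParams.contains name && !(d.contains name) then
        d.insert name (pvVal tokens it.1)
      else d)
    PySem.Dict.empty
  pvParams.foldl
    (fun acc param =>
      match found.get? param with
      | some v => acc ++ [(param, v)]
      | none => acc)
    []

-- ===== PRECONDITION & SPEC =====
-- Pre_ excludes exactly the inputs where Python A raises IndexError: some wanted parameter's
-- first occurrence (after quote-stripping) is the LAST token, so tokens[index+1] is out of range.
def Pre_parse_elastic (tokens : List String) : Prop :=
  ∀ p ∈ pvParams, PySem.List.index? (tokens.map pvStripQ) p ≠ some (tokens.length - 1)
instance (tokens : List String) : Decidable (Pre_parse_elastic tokens) := by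
  unfold Pre_parse_elastic; infer_instance

def pvWitness_parse_elastic : List String := ["\"Gamma\"", "18", "E1", "\"20.5\""]

def Spec_parse_elastic (tokens : List String) (out : List (String × String)) : Prop :=
  out = parse_elastic_alt tokens
instance (tokens : List String) (out : List (String × String)) : Decidable (Spec_parse_elastic tokens out) := by
  unfold Spec_parse_elastic; infer_instance

-- ===== CLAIM (what is proved, stated in full; the proofs are below) =====
def Claim_equal_parse_elastic : Prop :=
  ∀ (tokens : List String), Dom_parse_elastic tokens → Pre_parse_elastic tokens →
    Spec_parse_elastic tokens (parse_elastic tokens)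

-- ===== LEMMAS AND PROOFS =====

-- the value A's scan associates to a parameter name (first occurrence in the stripped tokens)
def pvG (tokens : List String) (p : String) : Option String :=
  (PySem.List.index? (tokens.map pvStripQ) p).map (fun k => pvVal tokens (k : Int))

-- B's forward pass: the dict built over `enumerate ts s` holds the value at the first occurrence
theorem pvPass_get? (tokens : List String) :
    ∀ (ts : List String) (s : Int) (d : PySem.Dict String String) (p : String),
      (((PySem.List.enumerate ts s).foldl
        (fun (d : PySem.Dict String String) it =>
          let name := pvStripQ it.2
          if pvParams.contains name && !(d.contains name) then
            d.insert name (pvVal tokens it.1)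
          else d) d).get? p) =
      if pvParams.contains p = true ∧ d.get? p = none then
        (PySem.List.index? (ts.map pvStripQ) p).map (fun k => pvVal tokens (s + (k : Int)))
      else d.get? p := by
  intro ts
  induction ts with
  | nil =>
    intro s d p
    rw [PySem.List.enumerate_nil, List.foldl_nil, List.map_nil]
    rw [show PySem.List.index? ([] : List String) p = none from rfl]
    split_ifs with h
    · exact h.2
    · rfl
  | cons x ts ih =>
    intro s d p
    rw [PySem.List.enumerate_cons, List.foldl_cons, ih, List.map_cons]
    have hstep : (let name := pvStripQ ((s : Int), x).2
        if pvParams.contains name && !(d.contains name) then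
          d.insert name (pvVal tokens ((s : Int), x).1)
        else d)
      = if pvParams.contains (pvStripQ x) && !(d.contains (pvStripQ x)) then
          d.insert (pvStripQ x) (pvVal tokens s)
        else d := rfl
    rw [hstep]
    by_cases hp : pvStripQ x = p
    · subst hp
      rw [PySem.List.index?_cons_self]
      by_cases hc : pvParams.contains (pvStripQ x) = true
      · by_cases hd : d.get? (pvStripQ x) = none
        · have hdc : d.contains (pvStripQ x) = false :=
            (PySem.Dict.get?_eq_none_iff_contains d _).mp hd
          have hbool : (pvParams.contains (pvStripQ x) && !(d.contains (pvStripQ x))) = true := by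
            rw [hc, hdc]; rfl
          rw [if_pos hbool, PySem.Dict.get?_insert_self,
              if_neg (fun h => Option.some_ne_none _ h.2), if_pos ⟨hc, hd⟩]
          simp
        · have hdc : d.contains (pvStripQ x) = true := by
            cases h : d.contains (pvStripQ x)
            · exact absurd ((PySem.Dict.get?_eq_none_iff_contains d _).mpr h) hd
            · rfl
          have hbool : (pvParams.contains (pvStripQ x) && !(d.contains (pvStripQ x))) = false := by
            rw [hdc]; simp
          have hnot : ¬ ((pvParams.contains (pvStripQ x) && !(d.contains (pvStripQ x))) = true) := by
            rw [hbool]; exact Bool.false_ne_true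
          rw [if_neg hnot, if_neg (fun h => hd h.2), if_neg (fun h => hd h.2)]
      · have hbool : (pvParams.contains (pvStripQ x) && !(d.contains (pvStripQ x))) = false := by
          cases h : pvParams.contains (pvStripQ x)
          · rfl
          · exact absurd h hc
        have hnot : ¬ ((pvParams.contains (pvStripQ x) && !(d.contains (pvStripQ x))) = true) := by
          rw [hbool]; exact Bool.false_ne_true
        rw [if_neg hnot, if_neg (fun h => hc h.1), if_neg (fun h => hc h.1)]
    · rw [PySem.List.index?_cons_of_ne _ hp]
      have hget : (if pvParams.contains (pvStripQ x) && !(d.contains (pvStripQ x)) then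
            d.insert (pvStripQ x) (pvVal tokens s)
          else d).get? p = d.get? p := by
        split_ifs with h
        · exact PySem.Dict.get?_insert_of_ne d _ (fun h' => hp h'.symm)
        · rfl
      rw [hget]
      split_ifs with h
      · cases hi : PySem.List.index? (List.map pvStripQ ts) p with
        | none => rfl
        | some a =>
          have harg : ∀ b : Int, s + 1 + b = s + (b + 1) := fun b => by ring
          simp [harg]
      · rfl

-- A's per-parameter fold, over fresh distinct keys, emits its items in parameter order
theorem pvA_items (tokens : List String) :
    ∀ (ps : List String) (d : PySem.Dict String String), ps.Nodup →
      (∀ q ∈ ps, d.contains q = false) →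
      (ps.foldl (fun (d : PySem.Dict String String) param =>
          match PySem.List.index? (tokens.map pvStripQ) param with
          | some i => d.insert param (pvVal tokens (i : Int))
          | none => d) d).items
        = d.items ++ ps.flatMap (fun q =>
            match pvG tokens q with
            | some v => [(q, v)]
            | none => []) := by
  intro ps
  induction ps with
  | nil => intro d _ _; simp
  | cons q ps ih =>
    intro d hnd hfresh
    rw [List.foldl_cons, List.flatMap_cons]
    cases hi : PySem.List.index? (tokens.map pvStripQ) q with
    | none =>
      have hg : pvG tokens q = none := by unfold pvG; rw [hi]; rfl
      simp only [hg]
      rw [ih d (List.Nodup.of_cons hnd) (fun r hr => hfresh r (List.mem_cons_of_mem _ hr))]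
      simp
    | some i =>
      have hg : pvG tokens q = some (pvVal tokens (i : Int)) := by unfold pvG; rw [hi]; rfl
      simp only [hg]
      rw [ih (d.insert q (pvVal tokens (i : Int))) (List.Nodup.of_cons hnd) ?_]
      · rw [PySem.Dict.items_insert_of_not_contains _ _ (hfresh q (List.mem_cons_self ..))]
        simp [List.append_assoc]
      · intro r hr
        rw [PySem.Dict.contains_insert]
        have hrq : (r == q) = false := by
          simp only [beq_eq_false_iff_ne]
          exact fun h => (List.nodup_cons.mp hnd).1 (h ▸ hr)
        rw [hrq, hfresh r (List.mem_cons_of_mem _ hr)]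
        rfl

-- B's emit loop over the canonical order, given what the pass dict answers for each name
theorem pvB_emit (found : PySem.Dict String String) (g : String → Option String) :
    ∀ (ps : List String) (acc : List (String × String)),
      (∀ q ∈ ps, found.get? q = g q) →
      ps.foldl (fun acc param =>
          match found.get? param with
          | some v => acc ++ [(param, v)]
          | none => acc) acc
        = acc ++ ps.flatMap (fun q =>
            match g q with
            | some v => [(q, v)]
            | none => []) := by
  intro ps
  induction ps with
  | nil => intro acc _; simp
  | cons q ps ih =>
    intro acc h
    rw [List.foldl_cons, List.flatMap_cons]
    rw [show found.get? q = g q from h q (List.mem_cons_self ..)]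
    cases hg : g q with
    | none =>
      rw [ih acc (fun r hr => h r (List.mem_cons_of_mem _ hr))]
      simp
    | some v =>
      rw [ih (acc ++ [(q, v)]) (fun r hr => h r (List.mem_cons_of_mem _ hr))]
      simp

-- ===== VERDICT (by name: the statement is the Claim_ definition above) =====
theorem parse_elastic_spec : Claim_equal_parse_elastic := by
  intro tokens _ _
  show parse_elastic tokens = parse_elastic_alt tokens
  have hA : parse_elastic tokens
      = pvParams.flatMap (fun q =>
          match pvG tokens q with
          | some v => [(q, v)]
          | none => []) := by
    unfold parse_elastic
    rw [pvA_items tokens pvParams PySem.Dict.empty (by decide) (fun q _ => rfl)]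
    rw [show (PySem.Dict.empty : PySem.Dict String String).items = [] from rfl, List.nil_append]
  have hfound : ∀ q ∈ pvParams,
      (((PySem.List.enumerate tokens 0).foldl
        (fun (d : PySem.Dict String String) it =>
          let name := pvStripQ it.2
          if pvParams.contains name && !(d.contains name) then
            d.insert name (pvVal tokens it.1)
          else d) PySem.Dict.empty).get? q) = pvG tokens q := by
    intro q hq
    rw [pvPass_get? tokens tokens 0 PySem.Dict.empty q,
        if_pos ⟨by simpa using hq, rfl⟩]
    unfold pvG
    cases hi : PySem.List.index? (tokens.map pvStripQ) q <;> simp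
  have hB : parse_elastic_alt tokens
      = pvParams.flatMap (fun q =>
          match pvG tokens q with
          | some v => [(q, v)]
          | none => []) := by
    unfold parse_elastic_alt
    exact pvB_emit _ (pvG tokens) pvParams [] hfound
  rw [hA, hB]
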